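-- pv_equiv track=rewrite | github.com/dandaprathyusha/NLP_ML_experiments | dialog_data_intent_extraction/data_creation/tourist_code/denorm_create_data_intermediate.py | make_denorm
-- ===== SOURCE A (Python) =====
-- from itertools import product
--
-- def make_denorm(all_list):
--     denorm_all_list = list()
--     denorm_dict = dict()
--
--     denorm_dict['naku'] = ['naku', 'naaku']
--     denorm_dict['pradeshalu'] = [
--         'pradeshalu', 'pradheshalu', 'pradeshaalu', 'pradheshaalu']
--     denorm_dict['chudalani'] = ['chudalani', 'choodalani']
--     denorm_dict['undi'] = ['undi', 'undhi']
--     denorm_dict['pradeshalaki'] = [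
--         'pradeshalaki', 'pradheshalaki', 'pradeshaalaki', 'pradheshaalaki']
--     denorm_dict['vellalanundi'] = ['vellalanundi', 'velalanundhi']
--     denorm_dict['pranthalaki'] = ['pranthalaki', 'praanthalaki']
--     denorm_dict['pranthalu'] = ['pranthalu', 'praanthalu']
--     denorm_dict['chupinchu'] = ['chupinchu', 'choopinchu']
--     denorm_dict['chudalanukuntunnanu'] = [
--         'chudalanukuntunnanu', 'choodalanukuntunnanu']
--     denorm_dict['daggarunna'] = ['daggarunna', 'dagarunna', 'daggaruna']
--     denorm_dict['chuttupakkala'] = [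
--         'chuttupakkala', 'chuttupakala', 'chuttupakkalaa']
--     denorm_dict['unna'] = ['unna', 'una']
--     denorm_dict['sandarshinchalani'] = [
--         'sandarshinchalani', 'sandharshinchalani']
--     denorm_dict['ki'] = ['ki', 'ky']
--     for all_list_item in all_list:
--         words_all_list_item_list = all_list_item.split()
--         index_values_list = list()
--         for index_word, word in enumerate(words_all_list_item_list):
--             if word in denorm_dict:
--                 values_list = denorm_dict[word]
--                 index_values_list.append(values_list)
--             else:
--                 index_values_list.append([word])
--         denorm_all_list += [' '.join(product_list_item)
--                             for product_list_item in product(*index_values_list)]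
--     return denorm_all_list
-- ===== SOURCE B (Python) =====
-- _DENORM = {
--     'naku': ['naku', 'naaku'],
--     'pradeshalu': ['pradeshalu', 'pradheshalu', 'pradeshaalu', 'pradheshaalu'],
--     'chudalani': ['chudalani', 'choodalani'],
--     'undi': ['undi', 'undhi'],
--     'pradeshalaki': ['pradeshalaki', 'pradheshalaki', 'pradeshaalaki', 'pradheshaalaki'],
--     'vellalanundi': ['vellalanundi', 'velalanundhi'],
--     'pranthalaki': ['pranthalaki', 'praanthalaki'],
--     'pranthalu': ['pranthalu', 'praanthalu'],
--     'chupinchu': ['chupinchu', 'choopinchu'],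
--     'chudalanukuntunnanu': ['chudalanukuntunnanu', 'choodalanukuntunnanu'],
--     'daggarunna': ['daggarunna', 'dagarunna', 'daggaruna'],
--     'chuttupakkala': ['chuttupakkala', 'chuttupakala', 'chuttupakkalaa'],
--     'unna': ['unna', 'una'],
--     'sandarshinchalani': ['sandarshinchalani', 'sandharshinchalani'],
--     'ki': ['ki', 'ky'],
-- }
--
--
-- def make_denorm(all_list):
--     out = []
--     for sentence in all_list:
--         words = sentence.split()
--         if not words:
--             out.append('')  # matches product of zero factors: one empty variant
--             continue
--         partials = _DENORM.get(words[0], [words[0]])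
--         for word in words[1:]:
--             variants = _DENORM.get(word, [word])
--             partials = [p + ' ' + v for p in partials for v in variants]
--         out.extend(partials)
--     return out
-- ===== Notes on version B (the rewrite author's own statement) =====
-- stated objective: faster
-- what changed: Replaces per-sentence collection of variant lists + itertools.product + ' '.join of each tuple with an incremental left-to-right fold that extends a running list of partial sentence strings with each word's variants, so no tuple materialisation or join pass.
import Mathlib
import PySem

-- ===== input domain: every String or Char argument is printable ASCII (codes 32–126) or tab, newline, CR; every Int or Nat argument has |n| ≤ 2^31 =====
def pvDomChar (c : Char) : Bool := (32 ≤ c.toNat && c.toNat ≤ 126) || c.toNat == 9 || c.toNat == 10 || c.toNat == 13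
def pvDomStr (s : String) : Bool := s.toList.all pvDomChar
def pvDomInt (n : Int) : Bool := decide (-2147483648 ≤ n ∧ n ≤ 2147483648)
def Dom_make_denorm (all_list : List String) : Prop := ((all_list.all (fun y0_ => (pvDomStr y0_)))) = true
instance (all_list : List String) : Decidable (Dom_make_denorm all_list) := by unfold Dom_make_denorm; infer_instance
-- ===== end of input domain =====

-- B replaces the per-word variant-list collection + itertools.product + join of A
-- with an incremental fold that extends a running list of partial sentences word by word
-- (alternative decomposition, same asymptotic cost).


-- shared data table (the dict both Pythons build, in insertion order)
def denormTable : PySem.Dict String (List String) := PySem.Dict.ofList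
  [ ("naku", ["naku", "naaku"]),
    ("pradeshalu", ["pradeshalu", "pradheshalu", "pradeshaalu", "pradheshaalu"]),
    ("chudalani", ["chudalani", "choodalani"]),
    ("undi", ["undi", "undhi"]),
    ("pradeshalaki", ["pradeshalaki", "pradheshalaki", "pradeshaalaki", "pradheshaalaki"]),
    ("vellalanundi", ["vellalanundi", "velalanundhi"]),
    ("pranthalaki", ["pranthalaki", "praanthalaki"]),
    ("pranthalu", ["pranthalu", "praanthalu"]),
    ("chupinchu", ["chupinchu", "choopinchu"]),
    ("chudalanukuntunnanu", ["chudalanukuntunnanu", "choodalanukuntunnanu"]),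
    ("daggarunna", ["daggarunna", "dagarunna", "daggaruna"]),
    ("chuttupakkala", ["chuttupakkala", "chuttupakala", "chuttupakkalaa"]),
    ("unna", ["unna", "una"]),
    ("sandarshinchalani", ["sandarshinchalani", "sandharshinchalani"]),
    ("ki", ["ki", "ky"]) ]

-- ===== PORT A =====
-- itertools.product over lists, in Python's order (rightmost factor varies fastest)
def pyProduct (ls : List (List String)) : List (List String) :=
  match ls with
  | [] => [[]]
  | l :: rest => l.flatMap (fun x => (pyProduct rest).map (fun t => x :: t))

def make_denorm (all_list : List String) : List String :=
  all_list.foldl (fun denorm_all_list all_list_item =>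
    let words := PySem.Str.split₀ all_list_item
    let index_values_list := words.foldl (fun ivl word =>
      match denormTable.get? word with
      | some values_list => ivl ++ [values_list]
      | none => ivl ++ [[word]]) []
    denorm_all_list ++ (pyProduct index_values_list).map (fun t => PySem.Str.join " " t)) []

-- ===== PORT B =====
-- _DENORM.get(word, [word])
def variantsOf (w : String) : List String := denormTable.getD w [w]

def make_denorm_alt (all_list : List String) : List String :=
  all_list.foldl (fun out sentence =>
    match PySem.Str.split₀ sentence with
    | [] => out ++ [""]
    | w :: rest =>
      out ++ rest.foldl (fun partials word =>
        partials.flatMap (fun p => (variantsOf word).map (fun v => p ++ " " ++ v)))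
        (variantsOf w)) []

-- ===== PRECONDITION & SPEC =====
def Spec_make_denorm (all_list : List String) (out : List String) : Prop := out = make_denorm_alt all_list
instance (all_list : List String) (out : List String) : Decidable (Spec_make_denorm all_list out) := by unfold Spec_make_denorm; infer_instance

-- ===== CLAIM (what is proved, stated in full; the proofs are below) =====
def Claim_equal_make_denorm : Prop := ∀ (all_list : List String), Dom_make_denorm all_list → Spec_make_denorm all_list (make_denorm all_list)

-- ===== LEMMAS AND PROOFS =====

theorem join_absorb (sep a b : List Char) (l : List (List Char)) :
    PySem.Chars.join sep ((a ++ sep ++ b) :: l) = PySem.Chars.join sep (a :: b :: l) := by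
  cases l with
  | nil => simp [PySem.Chars.join_singleton, PySem.Chars.join_cons_cons]
  | cons y l' =>
    rw [PySem.Chars.join_cons_cons, PySem.Chars.join_cons_cons,
        PySem.Chars.join_cons_cons]
    simp [List.append_assoc]

theorem join_eq_foldl (t : List String) : ∀ (v : String),
    PySem.Str.join " " (v :: t) = t.foldl (fun a x => a ++ " " ++ x) v := by
  induction t with
  | nil =>
    intro v
    simp [PySem.Str.join, PySem.Chars.join_singleton, String.ofList_toList]
  | cons x t ih =>
    intro v
    have h : PySem.Str.join " " (v :: x :: t)
        = PySem.Str.join " " ((v ++ " " ++ x) :: t) := by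
      simp only [PySem.Str.join, List.map_cons, String.toList_append]
      rw [join_absorb]
    rw [h, ih (v ++ " " ++ x)]
    rfl

theorem foldl_partials (rest : List String) : ∀ (ps : List String),
    rest.foldl (fun partials word =>
        partials.flatMap (fun p => (variantsOf word).map (fun v => p ++ " " ++ v))) ps
      = ps.flatMap (fun p =>
          (pyProduct (rest.map variantsOf)).map
            (fun t => t.foldl (fun a x => a ++ " " ++ x) p)) := by
  induction rest with
  | nil => intro ps; simp [pyProduct]
  | cons x r ih =>
    intro ps
    simp only [List.foldl_cons, ih, pyProduct, List.map_cons]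
    simp [List.flatMap_assoc, List.map_flatMap, List.flatMap_map, List.map_map,
          Function.comp_def]

theorem ivl_eq (words : List String) : ∀ (acc : List (List String)),
    words.foldl (fun ivl word =>
      match denormTable.get? word with
      | some values_list => ivl ++ [values_list]
      | none => ivl ++ [[word]]) acc = acc ++ words.map variantsOf := by
  induction words with
  | nil => intro acc; simp
  | cons w ws ih =>
    intro acc
    simp only [List.foldl_cons, List.map_cons, ih]
    cases h : denormTable.get? w with
    | none => simp [variantsOf, PySem.Dict.getD, h]
    | some vs => simp [variantsOf, PySem.Dict.getD, h]

theorem per_sentence (s : String) :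
    (pyProduct ((PySem.Str.split₀ s).map variantsOf)).map (fun t => PySem.Str.join " " t)
      = (match PySem.Str.split₀ s with
         | [] => [""]
         | w :: rest =>
           rest.foldl (fun partials word =>
             partials.flatMap (fun p => (variantsOf word).map (fun v => p ++ " " ++ v)))
             (variantsOf w)) := by
  cases h : PySem.Str.split₀ s with
  | nil =>
    simp [pyProduct, PySem.Str.join, PySem.Chars.join_nil]
  | cons w rest =>
    have hm : (match w :: rest with
         | [] => ([""] : List String)
         | w :: rest =>
           rest.foldl (fun partials word =>
             partials.flatMap (fun p => (variantsOf word).map (fun v => p ++ " " ++ v)))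
             (variantsOf w))
        = rest.foldl (fun partials word =>
             partials.flatMap (fun p => (variantsOf word).map (fun v => p ++ " " ++ v)))
             (variantsOf w) := rfl
    rw [hm, foldl_partials]
    simp only [List.map_cons, pyProduct, List.map_flatMap, List.map_map]
    congr 1
    funext v
    congr 1
    funext t
    simp [Function.comp, join_eq_foldl]

-- ===== VERDICT (by name: the statement is the Claim_ definition above) =====
theorem make_denorm_spec : Claim_equal_make_denorm := by
  intro all_list _
  unfold Spec_make_denorm make_denorm make_denorm_alt
  rw [PySem.List.foldl_append_eq_flatMap]
  have : ∀ (out : List String) (sentence : String),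
      (match PySem.Str.split₀ sentence with
       | [] => out ++ [""]
       | w :: rest =>
         out ++ rest.foldl (fun partials word =>
           partials.flatMap (fun p => (variantsOf word).map (fun v => p ++ " " ++ v)))
           (variantsOf w))
      = out ++ (match PySem.Str.split₀ sentence with
         | [] => [""]
         | w :: rest =>
           rest.foldl (fun partials word =>
             partials.flatMap (fun p => (variantsOf word).map (fun v => p ++ " " ++ v)))
             (variantsOf w)) := by
    intro out sentence
    cases PySem.Str.split₀ sentence <;> rfl
  simp only [this]
  rw [PySem.List.foldl_append_eq_flatMap]
  simp only [List.nil_append]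
  congr 1
  funext item
  rw [ivl_eq, List.nil_append, per_sentence]
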